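-- pv_equiv track=rewrite | github.com/bilgecag/activity_space_based_displacement_detection | migration_detector/traj_utils.py | fill_missing_day
-- ===== SOURCE A (Python) =====
-- def fill_missing_day(all_loc_rec, k):
--     """
--     For any location (L) in any day, see the next k days.
--     If in these k days, there is >= 1 day when this person appears in L,
--     then fill the gaps with L.
--     """
--     result_dict = {}
--     for loc in all_loc_rec.keys():
--         loc_date = all_loc_rec[loc]
--         loc_date.sort()
--         new_loc_date = list(loc_date)
--         if len(loc_date) > 1:
--             for i, date in enumerate(loc_date[:-1]):
--                 close_date = loc_date[i+1]
--                 date_diff = close_date - date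
--                 if 1 < date_diff <= k:
--                     new_loc_date += range(date+1, close_date)
--         new_loc_date.sort()
--         result_dict[loc] = new_loc_date
--     return result_dict
-- ===== SOURCE B (Python) =====
-- def fill_missing_day(all_loc_rec, k):
--     """Counter + interval merging: per location, count date multiplicities,
--     merge the distinct dates into maximal chains whose successive gaps are <= k,
--     then emit every day of each chain once (original days with their multiplicity).
--     (Like A, sorts each location's date list in place.)"""
--     result = {}
--     for loc, dates in all_loc_rec.items():
--         dates.sort()
--         cnt = {}
--         for d in dates:
--             cnt[d] = cnt.get(d, 0) + 1
--         intervals = []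
--         for v in cnt:  # keys ascend: dates was sorted when cnt was built
--             if intervals and v - intervals[-1][1] <= k:
--                 intervals[-1][1] = v
--             else:
--                 intervals.append([v, v])
--         out = []
--         for a, b in intervals:
--             for x in range(a, b + 1):
--                 if x in cnt:
--                     out.extend([x] * cnt[x])
--                 else:
--                     out.append(x)
--         result[loc] = out
--     return result
-- ===== Notes on version B (the rewrite author's own statement) =====
-- stated objective: alternative
-- what changed: B replaces A's per-pair gap-fill-append-then-resort with a counter plus interval-merge algorithm: count date multiplicities into a dict, merge the distinct dates into maximal chains whose successive gaps are <= k, then emit every day of each chain in one sweep (original days with their multiplicity, missing days once), so the second sort disappears.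
import Mathlib
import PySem

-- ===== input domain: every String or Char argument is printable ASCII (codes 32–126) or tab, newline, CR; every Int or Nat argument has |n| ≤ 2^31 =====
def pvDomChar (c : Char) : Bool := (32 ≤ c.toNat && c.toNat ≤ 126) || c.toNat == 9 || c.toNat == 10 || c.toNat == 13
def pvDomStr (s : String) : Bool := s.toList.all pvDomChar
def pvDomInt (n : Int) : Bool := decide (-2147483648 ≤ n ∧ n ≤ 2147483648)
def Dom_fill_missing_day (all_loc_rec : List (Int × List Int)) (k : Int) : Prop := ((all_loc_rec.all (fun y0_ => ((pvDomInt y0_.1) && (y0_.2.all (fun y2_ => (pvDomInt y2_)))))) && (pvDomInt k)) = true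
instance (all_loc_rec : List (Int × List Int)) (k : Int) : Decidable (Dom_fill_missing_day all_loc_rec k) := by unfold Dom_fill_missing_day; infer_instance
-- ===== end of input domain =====

-- B replaces A's pairwise gap-fill-then-resort with a counter + interval-merge algorithm
-- (count multiplicities, merge distinct dates into chains with gaps ≤ k, emit each chain's
-- days once); equivalence is about the return value (both Pythons sort each location's
-- list in place).

-- ===== PORT A =====
-- per-location body of A's loop: sort, append gap fills for close consecutive dates, re-sort
def aFill (k : Int) (loc_date : List Int) : List Int :=
  let sd := PySem.List.sorted loc_date (fun x => x)
  let new_loc_date :=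
    if 1 < sd.length then
      (PySem.List.enumerate (PySem.List.slice sd none (some (-1)))).foldl
        (fun acc q =>
          let close := PySem.List.pyGetD sd (q.1 + 1) 0
          let diff := close - q.2
          if 1 < diff ∧ diff ≤ k then acc ++ PySem.List.pyRange (q.2 + 1) close else acc)
        sd
    else sd
  PySem.List.sorted new_loc_date (fun x => x)

def fill_missing_day (all_loc_rec : List (Int × List Int)) (k : Int) : List (Int × List Int) :=
  all_loc_rec.foldl (fun res p => res ++ [(p.1, aFill k p.2)]) []

-- ===== PORT B =====
-- 'cnt = {}; for d in dates: cnt[d] = cnt.get(d, 0) + 1'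
def bCount (sd : List Int) : PySem.Dict Int Int :=
  sd.foldl (fun c d => c.insert d (c.getD d 0 + 1)) PySem.Dict.empty

-- 'for v in cnt: if intervals and v - intervals[-1][1] <= k: intervals[-1][1] = v else: intervals.append([v, v])'
def bIntervals (k : Int) (keysList : List Int) : List (Int × Int) :=
  keysList.foldl (fun ivs v =>
    match ivs.getLast? with
    | some ab => if v - ab.2 ≤ k then ivs.dropLast ++ [(ab.1, v)] else ivs ++ [(v, v)]
    | none => [(v, v)]) []

-- 'for a, b in intervals: for x in range(a, b+1): out.extend([x]*cnt[x]) if x in cnt else out.append(x)'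
-- (cnt[x] is read under the 'x in cnt' guard, so getD x 0 is exactly the stored value)
def bExpand (cnt : PySem.Dict Int Int) (ivs : List (Int × Int)) : List Int :=
  ivs.foldl (fun out ab =>
    (PySem.List.pyRange ab.1 (ab.2 + 1)).foldl (fun out x =>
      if cnt.contains x then out ++ PySem.List.pyRepeat [x] (cnt.getD x 0)
      else out ++ [x]) out) []

-- per-location body of B's loop
def bFillLoc (k : Int) (dates : List Int) : List Int :=
  let sd := PySem.List.sorted dates (fun x => x)
  let cnt := bCount sd
  bExpand cnt (bIntervals k (PySem.Dict.keys cnt))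

def fill_missing_day_alt (all_loc_rec : List (Int × List Int)) (k : Int) : List (Int × List Int) :=
  all_loc_rec.foldl (fun res p => res ++ [(p.1, bFillLoc k p.2)]) []

-- ===== PRECONDITION & SPEC =====
def Spec_fill_missing_day (all_loc_rec : List (Int × List Int)) (k : Int) (out : List (Int × List Int)) : Prop := out = fill_missing_day_alt all_loc_rec k
instance (all_loc_rec : List (Int × List Int)) (k : Int) (out : List (Int × List Int)) : Decidable (Spec_fill_missing_day all_loc_rec k out) := by unfold Spec_fill_missing_day; infer_instance

-- ===== CLAIM (what is proved, stated in full; the proofs are below) =====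
def Claim_equal_fill_missing_day : Prop := ∀ (all_loc_rec : List (Int × List Int)) (k : Int), Dom_fill_missing_day all_loc_rec k → Spec_fill_missing_day all_loc_rec k (fill_missing_day all_loc_rec k)

-- ===== LEMMAS AND PROOFS =====

-- the days A appends for one consecutive pair of sorted dates
def gapFill (k d d' : Int) : List Int :=
  if 1 < d' - d ∧ d' - d ≤ k then PySem.List.pyRange (d + 1) d' else []

-- all gap fills of a sorted list, pair by pair
def gapsOf (k : Int) : List Int → List Int
  | [] => []
  | [_] => []
  | d :: d' :: r => gapFill k d d' ++ gapsOf k (d' :: r)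

-- a one-pass ascending gap fill used as the common canonical form of both programs
def fillAux (k : Int) (p : Int) : List Int → List Int
  | [] => []
  | d :: r => gapFill k p d ++ d :: fillAux k d r

def oneFill (k : Int) : List Int → List Int
  | [] => []
  | d :: r => d :: fillAux k d r

-- the runs-level canonical form: distinct values u with multiplicities c
def expandU (c : Int → Nat) (u : List Int) : List Int :=
  u.flatMap (fun v => List.replicate (c v) v)

def uAux (k : Int) (c : Int → Nat) (p : Int) : List Int → List Int
  | [] => []
  | v :: t => gapFill k p v ++ List.replicate (c v) v ++ uAux k c v t

def uFill (k : Int) (c : Int → Nat) : List Int → List Int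
  | [] => []
  | v :: t => List.replicate (c v) v ++ uAux k c v t

-- the interval list B's merge loop produces, head-recursively
def ivFrom (k : Int) : List Int → Int → Int → List (Int × Int)
  | [], a, b => [(a, b)]
  | v :: t, a, b => if v - b ≤ k then ivFrom k t a v else (a, b) :: ivFrom k t v v

-- what B emits for one day / one interval
def dayEmit (cnt : PySem.Dict Int Int) (x : Int) : List Int :=
  if cnt.contains x then PySem.List.pyRepeat [x] (cnt.getD x 0) else [x]

def emitIv (cnt : PySem.Dict Int Int) (ab : Int × Int) : List Int :=
  (PySem.List.pyRange ab.1 (ab.2 + 1)).flatMap (dayEmit cnt)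

lemma mem_gapFill {k a b x : Int} (h : x ∈ gapFill k a b) : a < x ∧ x < b := by
  unfold gapFill at h
  split at h
  · rcases PySem.List.mem_pyRange_one.mp h with ⟨h1, h2⟩; omega
  · simp at h

lemma gapFill_self (k p : Int) : gapFill k p p = [] := by
  unfold gapFill; split
  · omega
  · rfl

-- ---- A-side: aFill computes sorted(sd ++ gapsOf sd) ----

lemma enum_fold_gaps (k : Int) (full : List Int) : ∀ (l : List Int) (s : Nat) (acc : List Int),
    full.drop s = l →
    (PySem.List.enumerate l.dropLast (s : Int)).foldl
      (fun acc q =>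
        let close := PySem.List.pyGetD full (q.1 + 1) 0
        let diff := close - q.2
        if 1 < diff ∧ diff ≤ k then acc ++ PySem.List.pyRange (q.2 + 1) close else acc)
      acc = acc ++ gapsOf k l := by
  intro l
  induction l with
  | nil => intro s acc _; simp [gapsOf]
  | cons d t ih =>
      intro s acc hdrop
      cases t with
      | nil => simp [gapsOf]
      | cons d' r =>
          have hclose : PySem.List.pyGetD full ((s : Int) + 1) 0 = d' := by
            have h1 : full.drop (s + 1) = d' :: r := by
              have := congrArg List.tail hdrop
              simpa [List.tail_drop] using this
            rw [show ((s : Int) + 1) = ((s + 1 : Nat) : Int) by push_cast; ring]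
            rw [PySem.List.pyGetD_of_nonneg full 0 (by positivity)]
            simp only [Int.toNat_natCast]
            have : full[s+1]? = some d' := by
              rw [← List.head?_drop, h1]; rfl
            simp [List.getD, this]
          rw [List.dropLast_cons₂]
          simp only [PySem.List.enumerate_cons, List.foldl_cons]
          rw [hclose]
          have hstep : ∀ acc : List Int,
              (if 1 < d' - d ∧ d' - d ≤ k then acc ++ PySem.List.pyRange (d + 1) d' else acc)
                = acc ++ gapFill k d d' := by
            intro acc; unfold gapFill; split <;> simp
          rw [hstep]
          have h1 : full.drop (s + 1) = d' :: r := by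
            have := congrArg List.tail hdrop
            simpa [List.tail_drop] using this
          have := ih (s + 1) (acc ++ gapFill k d d') h1
          rw [show ((s : Int) + 1) = ((s + 1 : Nat) : Int) by push_cast; ring]
          rw [this]
          simp [gapsOf]

lemma aFill_eq_sorted (k : Int) (l : List Int) :
    aFill k l = PySem.List.sorted
      (PySem.List.sorted l (fun x => x) ++ gapsOf k (PySem.List.sorted l (fun x => x)))
      (fun x => x) := by
  unfold aFill
  set sd := PySem.List.sorted l (fun x => x) with hsd
  clear_value sd
  by_cases hlen : 1 < sd.length
  · simp only [hlen, if_true]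
    rw [PySem.List.slice_to_neg_one]
    have h0 := enum_fold_gaps k sd sd 0 sd (by simp)
    simp only [Nat.cast_zero] at h0
    rw [h0]
  · simp only [hlen, if_false]
    rcases sd with _ | ⟨x, _ | ⟨y, t⟩⟩
    · simp [gapsOf]
    · simp [gapsOf]
    · simp at hlen

-- ---- oneFill is the sorted enlarged list ----

lemma gapFill_pairwise (k a b : Int) : (gapFill k a b).Pairwise (· ≤ ·) := by
  unfold gapFill
  split
  · exact (PySem.List.pairwise_lt_pyRange_one _ _).imp le_of_lt
  · simp

lemma oneFill_pair (k d d' : Int) (r : List Int) :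
    oneFill k (d :: d' :: r) = d :: (gapFill k d d' ++ oneFill k (d' :: r)) := by
  simp [oneFill, fillAux]

lemma mem_oneFill_ge (k : Int) : ∀ (r : List Int) (c : Int),
    (c :: r).Pairwise (· ≤ ·) → ∀ x ∈ oneFill k (c :: r), c ≤ x := by
  intro r
  induction r with
  | nil => intro c _ x hx; simp [oneFill, fillAux] at hx; omega
  | cons d' t ih =>
      intro c hp x hx
      rw [oneFill_pair] at hx
      have hcd : c ≤ d' := (List.pairwise_cons.mp hp).1 d' (by simp)
      simp only [List.mem_cons, List.mem_append] at hx
      rcases hx with hx | hx | hx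
      · omega
      · have := mem_gapFill hx; omega
      · have := ih d' (List.pairwise_cons.mp hp).2 x (by simpa using hx); omega

lemma oneFill_pairwise (k : Int) : ∀ (l : List Int),
    l.Pairwise (· ≤ ·) → (oneFill k l).Pairwise (· ≤ ·) := by
  intro l
  induction l with
  | nil => intro _; simp [oneFill]
  | cons c t ih =>
      intro hp
      cases t with
      | nil => simp [oneFill, fillAux]
      | cons d' r =>
          have hp' := (List.pairwise_cons.mp hp).2
          have hcd : c ≤ d' := (List.pairwise_cons.mp hp).1 d' (by simp)
          rw [oneFill_pair]
          refine List.pairwise_cons.mpr ⟨?_, ?_⟩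
          · intro y hy
            rcases List.mem_append.mp hy with hy | hy
            · have := mem_gapFill hy; omega
            · have := mem_oneFill_ge k r d' hp' y hy; omega
          · refine List.pairwise_append.mpr ⟨gapFill_pairwise k c d', ih hp', ?_⟩
            intro a ha b hb
            have h1 := mem_gapFill ha
            have h2 := mem_oneFill_ge k r d' hp' b hb
            omega

lemma oneFill_perm (k : Int) : ∀ (l : List Int), (oneFill k l).Perm (l ++ gapsOf k l) := by
  intro l
  induction l with
  | nil => simp [oneFill, gapsOf]
  | cons c t ih =>
      cases t with
      | nil => simp [oneFill, fillAux, gapsOf]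
      | cons d' r =>
          rw [oneFill_pair]
          have ih' : (oneFill k (d' :: r)).Perm ((d' :: r) ++ gapsOf k (d' :: r)) := ih
          have h1 : (gapFill k c d' ++ oneFill k (d' :: r)).Perm
              ((d' :: r) ++ (gapFill k c d' ++ gapsOf k (d' :: r))) :=
            (ih'.append_left _).trans (List.perm_append_comm_assoc _ _ _)
          simpa [gapsOf] using h1.cons c

lemma aFill_eq_oneFill (k : Int) (l : List Int) :
    aFill k l = oneFill k (PySem.List.sorted l (fun x => x)) := by
  rw [aFill_eq_sorted]
  have hsd : (PySem.List.sorted l (fun x => x)).Pairwise (· ≤ ·) := by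
    simpa using PySem.List.sorted_pairwise l (fun x => x)
  exact PySem.List.sorted_id_eq_of_perm_of_pairwise _ _ (oneFill_perm k _) (oneFill_pairwise k _ hsd)

-- ---- oneFill of an expanded runs list is the runs-level fill ----

lemma fillAux_rep_self (k p : Int) : ∀ (c : Nat) (rest : List Int),
    fillAux k p (List.replicate c p ++ rest) = List.replicate c p ++ fillAux k p rest := by
  intro c
  induction c with
  | zero => intro rest; simp
  | succ c ih =>
      intro rest
      simp only [List.replicate_succ, List.cons_append, fillAux, gapFill_self, ih]
      simp

lemma fillAux_expandU (k : Int) (c : Int → Nat) : ∀ (t : List Int) (p : Int),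
    (∀ v ∈ t, 1 ≤ c v) → fillAux k p (expandU c t) = uAux k c p t := by
  intro t
  induction t with
  | nil => intro p _; simp [expandU, fillAux, uAux]
  | cons v t ih =>
      intro p hc
      have hv : 1 ≤ c v := hc v (by simp)
      obtain ⟨m, hm⟩ : ∃ m, c v = m + 1 := ⟨c v - 1, by omega⟩
      have hrw : expandU c (v :: t) = v :: (List.replicate m v ++ expandU c t) := by
        simp [expandU, hm, List.replicate_succ]
      rw [hrw]
      simp only [fillAux]
      rw [fillAux_rep_self k v m (expandU c t)]
      rw [ih v (fun w hw => hc w (by simp [hw]))]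
      simp [uAux, hm, List.replicate_succ]

lemma oneFill_expandU (k : Int) (c : Int → Nat) (u : List Int)
    (hc : ∀ v ∈ u, 1 ≤ c v) : oneFill k (expandU c u) = uFill k c u := by
  cases u with
  | nil => simp [expandU, oneFill, uFill]
  | cons v t =>
      have hv : 1 ≤ c v := hc v (by simp)
      obtain ⟨m, hm⟩ : ∃ m, c v = m + 1 := ⟨c v - 1, by omega⟩
      have hrw : expandU c (v :: t) = v :: (List.replicate m v ++ expandU c t) := by
        simp [expandU, hm, List.replicate_succ]
      rw [hrw]
      simp only [oneFill]
      rw [fillAux_rep_self k v m (expandU c t)]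
      rw [fillAux_expandU k c t v (fun w hw => hc w (by simp [hw]))]
      simp [uFill, hm, List.replicate_succ]

-- ---- a sorted list is its distinct values expanded by multiplicity ----

lemma mem_expandU {c : Int → Nat} {u : List Int} {x : Int} (h : x ∈ expandU c u) : x ∈ u := by
  unfold expandU at h
  rcases List.mem_flatMap.mp h with ⟨v, hv, hx⟩
  rcases List.eq_of_mem_replicate hx with rfl
  exact hv

lemma pairwise_expandU (c : Int → Nat) : ∀ (u : List Int),
    u.Pairwise (· < ·) → (expandU c u).Pairwise (· ≤ ·) := by
  intro u
  induction u with
  | nil => intro _; simp [expandU]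
  | cons v t ih =>
      intro hp
      simp only [expandU, List.flatMap_cons]
      refine List.pairwise_append.mpr ⟨?_, ih (List.pairwise_cons.mp hp).2, ?_⟩
      · exact List.pairwise_replicate.mpr (by simp)
      · intro a ha b hb
        rcases List.eq_of_mem_replicate ha with rfl
        have hb' := mem_expandU (c := c) (u := t) hb
        exact le_of_lt ((List.pairwise_cons.mp hp).1 b hb')

lemma count_expandU (c : Int → Nat) : ∀ (u : List Int), u.Nodup → ∀ x,
    (expandU c u).count x = if x ∈ u then c x else 0 := by
  intro u
  induction u with
  | nil => intro _ x; simp [expandU]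
  | cons v t ih =>
      intro hnd x
      simp only [expandU, List.flatMap_cons, List.count_append, List.count_replicate]
      rw [show (t.flatMap fun v => List.replicate (c v) v) = expandU c t from rfl,
        ih hnd.of_cons x]
      by_cases hxv : x = v
      · subst hxv
        have : x ∉ t := (List.nodup_cons.mp hnd).1
        simp [this]
      · simp [hxv, Ne.symm hxv]

lemma ofList_sublist : ∀ (s : List Int), (PySem.Set.ofList s).Sublist s := by
  intro s
  induction s with
  | nil => simp [PySem.Set.ofList_nil]
  | cons x t ih =>
      rw [PySem.Set.ofList_cons]
      exact List.Sublist.cons₂ x (List.filter_sublist.trans ih)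

lemma ofList_pairwise_lt {s : List Int} (hs : s.Pairwise (· ≤ ·)) :
    (PySem.Set.ofList s).Pairwise (· < ·) := by
  have h1 : (PySem.Set.ofList s).Pairwise (· ≤ ·) := hs.sublist (ofList_sublist s)
  have h2 : (PySem.Set.ofList s).Nodup := PySem.Set.nodup_ofList s
  exact (h2.imp₂ (fun a b hne hle => lt_of_le_of_ne hle hne) h1 : _)

lemma sorted_eq_expandU {s : List Int} (hs : s.Pairwise (· ≤ ·)) :
    s = expandU (fun v => s.count v) (PySem.Set.ofList s) := by
  have hu := ofList_pairwise_lt hs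
  refine PySem.List.eq_of_perm_of_pairwise_le_of_injective (fun x => x)
    (fun _ _ h => h) ?_ hs (pairwise_expandU _ _ hu)
  rw [List.perm_iff_count]
  intro x
  rw [count_expandU _ _ (PySem.Set.nodup_ofList s) x]
  by_cases hx : x ∈ s
  · simp [PySem.Set.mem_ofList, hx]
  · simp [PySem.Set.mem_ofList, hx, List.count_eq_zero_of_not_mem hx]

-- ---- B's interval loop produces ivFrom ----

lemma bIntervals_fold (k : Int) : ∀ (t : List Int) (ivs : List (Int × Int)) (a b : Int),
    t.foldl (fun ivs v =>
      match ivs.getLast? with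
      | some ab => if v - ab.2 ≤ k then ivs.dropLast ++ [(ab.1, v)] else ivs ++ [(v, v)]
      | none => [(v, v)]) (ivs ++ [(a, b)]) = ivs ++ ivFrom k t a b := by
  intro t
  induction t with
  | nil => intro ivs a b; simp [ivFrom]
  | cons v t ih =>
      intro ivs a b
      simp only [List.foldl_cons, List.getLast?_concat, List.dropLast_concat, ivFrom]
      split
      · exact ih ivs a v
      · rw [List.append_assoc]
        have := ih (ivs ++ [(a, b)]) v v
        simpa using this

lemma bIntervals_cons (k v : Int) (t : List Int) :
    bIntervals k (v :: t) = ivFrom k t v v := by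
  unfold bIntervals
  simp only [List.foldl_cons]
  have := bIntervals_fold k t [] v v
  simpa using this

-- ---- B's expansion loop is a flatMap of emitIv ----

lemma bExpand_eq_flatMap (cnt : PySem.Dict Int Int) (ivs : List (Int × Int)) :
    bExpand cnt ivs = ivs.flatMap (emitIv cnt) := by
  unfold bExpand
  have hinner : ∀ (ab : Int × Int) (out : List Int),
      (PySem.List.pyRange ab.1 (ab.2 + 1)).foldl (fun out x =>
        if cnt.contains x then out ++ PySem.List.pyRepeat [x] (cnt.getD x 0)
        else out ++ [x]) out = out ++ emitIv cnt ab := by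
    intro ab out
    have hcongr : ∀ (out : List Int) (x : Int),
        (if cnt.contains x then out ++ PySem.List.pyRepeat [x] (cnt.getD x 0) else out ++ [x])
          = out ++ dayEmit cnt x := by
      intro out x; unfold dayEmit; split <;> rfl
    exact (PySem.List.foldl_congr_mem _ _ (fun out x => out ++ dayEmit cnt x) _
      (fun acc x _ => hcongr acc x)).trans (PySem.List.foldl_append_eq_flatMap _ _ _)
  exact (PySem.List.foldl_congr_mem _ _ (fun out ab => out ++ emitIv cnt ab) _
    (fun acc ab _ => hinner ab acc)).trans (by simpa using PySem.List.foldl_append_eq_flatMap (emitIv cnt) ivs [])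

-- ---- no distinct value lies strictly between consecutive distinct values ----

lemma not_mem_between {u pre t : List Int} {b v x : Int}
    (hu : u.Pairwise (· < ·)) (h : u = pre ++ b :: v :: t)
    (hx1 : b < x) (hx2 : x < v) : x ∉ u := by
  intro hx
  subst h
  rcases List.mem_append.mp hx with hx | hx
  · have hpb := List.pairwise_append.mp hu
    have := hpb.2.2 x hx b (by simp)
    omega
  · have hsuf : (b :: v :: t).Pairwise (· < ·) := (List.pairwise_append.mp hu).2.1
    have hx' : x = b ∨ x = v ∨ x ∈ t := by simpa using hx
    rcases hx' with rfl | rfl | hx'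
    · omega
    · omega
    · have := (List.pairwise_cons.mp (List.pairwise_cons.mp hsuf).2).1 x hx'
      omega

lemma flatMap_id_of_singleton {f : Int → List Int} : ∀ (L : List Int),
    (∀ x ∈ L, f x = [x]) → L.flatMap f = L := by
  intro L
  induction L with
  | nil => intro _; simp
  | cons x t ih =>
      intro h
      simp only [List.flatMap_cons, h x (by simp), ih (fun y hy => h y (by simp [hy]))]
      rfl

-- ---- the main correspondence: merged intervals expand to the runs-level fill ----

lemma dayEmit_mem (cnt : PySem.Dict Int Int) (c : Int → Nat) (u : List Int)
    (Hc : ∀ x, cnt.contains x = true ↔ x ∈ u)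
    (Hv : ∀ v ∈ u, cnt.getD v 0 = (c v : Int)) {v : Int} (hv : v ∈ u) :
    dayEmit cnt v = List.replicate (c v) v := by
  unfold dayEmit
  rw [if_pos ((Hc v).mpr hv)]
  rw [Hv v hv, PySem.List.pyRepeat_singleton]
  simp


lemma main_expand (k : Int) (u : List Int) (cnt : PySem.Dict Int Int) (c : Int → Nat)
    (hu : u.Pairwise (· < ·))
    (Hc : ∀ x, cnt.contains x = true ↔ x ∈ u)
    (Hv : ∀ v ∈ u, cnt.getD v 0 = (c v : Int)) :
    ∀ (t pre : List Int) (a b : Int), u = pre ++ b :: t → a ≤ b →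
      (ivFrom k t a b).flatMap (emitIv cnt)
        = (PySem.List.pyRange a (b + 1)).flatMap (dayEmit cnt) ++ uAux k c b t := by
  intro t
  induction t with
  | nil => intro pre a b h hab; simp [ivFrom, emitIv, uAux]
  | cons v t ih =>
      intro pre a b h hab
      have hsuf : (b :: v :: t).Pairwise (· < ·) := by
        have := h ▸ hu
        exact (List.pairwise_append.mp this).2.1
      have hbv : b < v := (List.pairwise_cons.mp hsuf).1 v (by simp)
      have hvu : v ∈ u := by rw [h]; simp
      have hdv : dayEmit cnt v = List.replicate (c v) v := dayEmit_mem cnt c u Hc Hv hvu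
      have hgap : ∀ x ∈ PySem.List.pyRange (b + 1) v, dayEmit cnt x = [x] := by
        intro x hx
        rcases PySem.List.mem_pyRange_one.mp hx with ⟨h1, h2⟩
        have hnx : x ∉ u := not_mem_between hu h (by omega) h2
        have hcx : cnt.contains x = false := by
          by_contra hne
          have hb : cnt.contains x = true := by simpa using hne
          exact hnx ((Hc x).mp hb)
        simp [dayEmit, hcx]
      simp only [ivFrom]
      by_cases hvk : v - b ≤ k
      · rw [if_pos hvk]
        rw [ih (pre ++ [b]) a v (by rw [h]; simp) (by omega)]
        have hsplit : PySem.List.pyRange a (v + 1)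
            = PySem.List.pyRange a (b + 1) ++ (PySem.List.pyRange (b + 1) v ++ [v]) := by
          rw [PySem.List.pyRange_one_append a (b + 1) (v + 1) (by omega) (by omega)]
          rw [PySem.List.pyRange_one_succ_right (show (b:Int) + 1 ≤ v by omega)]
        rw [hsplit]
        rw [List.flatMap_append, List.flatMap_append]
        rw [flatMap_id_of_singleton _ hgap]
        have hgf : gapFill k b v = PySem.List.pyRange (b + 1) v := by
          unfold gapFill
          split
          · rfl
          · have hd1 : v - b = 1 := by omega
            rw [PySem.List.pyRange_one_eq_nil (by omega)]
        simp only [uAux, hgf, List.flatMap_cons, List.flatMap_nil, List.append_nil, hdv]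
        simp [List.append_assoc]
      · rw [if_neg hvk]
        simp only [List.flatMap_cons]
        rw [ih (pre ++ [b]) v v (by rw [h]; simp) le_rfl]
        have hgf : gapFill k b v = [] := by
          unfold gapFill
          split
          · omega
          · rfl
        rw [PySem.List.pyRange_one_singleton]
        simp only [uAux, hgf, List.flatMap_cons, List.flatMap_nil, List.append_nil, hdv,
          List.nil_append, emitIv]

-- ---- per-location equality ----

lemma bFillLoc_eq_oneFill (k : Int) (l : List Int) :
    bFillLoc k l = oneFill k (PySem.List.sorted l (fun x => x)) := by
  simp only [bFillLoc]
  set sd := PySem.List.sorted l (fun x => x) with hsdd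
  have hs : sd.Pairwise (· ≤ ·) := by
    simpa using PySem.List.sorted_pairwise l (fun x => x)
  have hcnt : bCount sd = PySem.Dict.counter sd := rfl
  have hkeys : (bCount sd).keys = PySem.Set.ofList sd := by
    rw [hcnt]; exact PySem.Dict.keys_counter sd
  have hu : (PySem.Set.ofList sd).Pairwise (· < ·) := ofList_pairwise_lt hs
  have Hc : ∀ x, (bCount sd).contains x = true ↔ x ∈ PySem.Set.ofList sd := by
    intro x
    rw [hcnt, PySem.Dict.contains_counter]
    simp [PySem.Set.mem_ofList]
  have Hv : ∀ v ∈ PySem.Set.ofList sd,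
      (bCount sd).getD v 0 = ((fun v => sd.count v) v : Int) := by
    intro v _
    rw [hcnt]; exact PySem.Dict.getD_counter sd v
  have hc1 : ∀ v ∈ PySem.Set.ofList sd, 1 ≤ sd.count v := by
    intro v hv
    exact List.count_pos_iff.mpr ((PySem.Set.mem_ofList _ _).mp hv)
  cases hu0 : PySem.Set.ofList sd with
  | nil =>
      have hnil : sd = [] := by
        cases hsd : sd with
        | nil => rfl
        | cons a s =>
            exfalso
            have : a ∈ PySem.Set.ofList sd := (PySem.Set.mem_ofList _ _).mpr (by rw [hsd]; simp)
            rw [hu0] at this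
            simp at this
      rw [hkeys, hu0, hnil]
      rfl
  | cons v0 t0 =>
      rw [hkeys, hu0, bIntervals_cons, bExpand_eq_flatMap]
      rw [main_expand k (PySem.Set.ofList sd) (bCount sd) (fun v => sd.count v) hu Hc Hv
        t0 [] v0 v0 (by rw [hu0]; rfl) le_rfl]
      have hv0 : v0 ∈ PySem.Set.ofList sd := by rw [hu0]; simp
      rw [PySem.List.pyRange_one_singleton]
      simp only [List.flatMap_cons, List.flatMap_nil, List.append_nil,
        dayEmit_mem (bCount sd) (fun v => sd.count v) (PySem.Set.ofList sd) Hc Hv hv0]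
      have : List.replicate (sd.count v0) v0 ++ uAux k (fun v => sd.count v) v0 t0
          = uFill k (fun v => sd.count v) (v0 :: t0) := rfl
      rw [this, ← hu0]
      rw [← oneFill_expandU k (fun v => sd.count v) (PySem.Set.ofList sd) hc1]
      rw [← sorted_eq_expandU hs]

lemma perLoc (k : Int) (l : List Int) : aFill k l = bFillLoc k l := by
  rw [aFill_eq_oneFill, bFillLoc_eq_oneFill]

-- ===== VERDICT (by name: the statement is the Claim_ definition above) =====
theorem fill_missing_day_spec : Claim_equal_fill_missing_day := by
  intro m k _
  unfold Spec_fill_missing_day fill_missing_day fill_missing_day_alt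
  simp only [perLoc]
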